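-- pv_equiv track=rewrite | github.com/Fitzy-dev/fitzgerald-dev-projects | python/projects/ISBN-Validator/ISBN_validator.py | calculate_check_digit_13
-- ===== SOURCE A (Python) =====
-- def calculate_check_digit_13(main_digits_list):
--     digits_sum = 0
--
--     for index, digit in enumerate(main_digits_list):
--         if index % 2 == 0:
--             digits_sum += digit
--         else:
--             digits_sum += digit * 3
--
--     result = (10 - digits_sum % 10) % 10
--     return str(result)
-- ===== SOURCE B (Python) =====
-- def calculate_check_digit_13(main_digits_list):
--     even_sum = sum(main_digits_list[::2])
--     odd_sum = sum(main_digits_list[1::2])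
--     return str((10 - (even_sum + 3 * odd_sum) % 10) % 10)
-- ===== Notes on version B (the rewrite author's own statement) =====
-- stated objective: simpler
-- what changed: Replaces the single enumerate loop with a per-index parity test by two strided slice sums (xs[::2] and xs[1::2]) combined as even_sum + 3*odd_sum before the same modular formula.
import Mathlib
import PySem

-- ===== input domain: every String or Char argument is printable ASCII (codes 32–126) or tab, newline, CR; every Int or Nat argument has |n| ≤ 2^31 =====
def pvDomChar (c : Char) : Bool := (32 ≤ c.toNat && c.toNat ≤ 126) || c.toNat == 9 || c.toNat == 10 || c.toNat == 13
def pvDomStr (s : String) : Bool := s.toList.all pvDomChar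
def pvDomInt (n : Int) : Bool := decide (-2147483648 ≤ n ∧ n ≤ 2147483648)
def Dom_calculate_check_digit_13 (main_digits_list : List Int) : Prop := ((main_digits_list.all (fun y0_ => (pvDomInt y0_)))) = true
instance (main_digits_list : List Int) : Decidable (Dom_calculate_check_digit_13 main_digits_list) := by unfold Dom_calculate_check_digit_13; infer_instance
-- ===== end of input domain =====

-- B replaces A's single enumerate loop with a per-index parity branch by two strided
-- slice sums (xs[::2], xs[1::2]) combined as even_sum + 3*odd_sum; objective: simpler.

-- ===== PORT A =====
def calculate_check_digit_13 (main_digits_list : List Int) : String :=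
  let digits_sum : Int :=
    (PySem.List.enumerate main_digits_list).foldl
      (fun digits_sum p =>
        if PySem.Int.mod p.1 2 == 0 then digits_sum + p.2 else digits_sum + p.2 * 3)
      0
  let result : Int := PySem.Int.mod (10 - PySem.Int.mod digits_sum 10) 10
  PySem.Int.toStr result

-- ===== PORT B =====
def calculate_check_digit_13_alt (main_digits_list : List Int) : String :=
  let even_sum : Int := ((PySem.List.slice? main_digits_list none none 2).getD []).sum
  let odd_sum : Int := ((PySem.List.slice? main_digits_list (some 1) none 2).getD []).sum
  PySem.Int.toStr (PySem.Int.mod (10 - PySem.Int.mod (even_sum + 3 * odd_sum) 10) 10)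

-- ===== PRECONDITION & SPEC =====
def Spec_calculate_check_digit_13 (main_digits_list : List Int) (out : String) : Prop := out = calculate_check_digit_13_alt main_digits_list
instance (main_digits_list : List Int) (out : String) : Decidable (Spec_calculate_check_digit_13 main_digits_list out) := by unfold Spec_calculate_check_digit_13; infer_instance

-- ===== CLAIM (what is proved, stated in full; the proofs are below) =====
def Claim_equal_calculate_check_digit_13 : Prop := ∀ (main_digits_list : List Int), Dom_calculate_check_digit_13 main_digits_list → Spec_calculate_check_digit_13 main_digits_list (calculate_check_digit_13 main_digits_list)

-- ===== LEMMAS AND PROOFS =====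

-- structural even-/odd-indexed sublists, used only in the proofs
mutual
def pvEvens : List Int → List Int
  | [] => []
  | a :: t => a :: pvOdds t
def pvOdds : List Int → List Int
  | [] => []
  | _ :: t => pvEvens t
end

theorem pv_fmod_two (a : Int) : a.fmod 2 = a % 2 := by
  simp [Int.fmod_eq_emod]

theorem pv_filterMap_evens : ∀ (xs : List Int),
    List.filterMap (fun k : Nat => xs[(2 * (k : Int)).toNat]?)
      (List.range (((xs.length : Int) + 1) / 2).toNat) = pvEvens xs
  | [] => by simp [pvEvens]
  | [a] => by simp [pvEvens, pvOdds]
  | a :: b :: t => by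
    have hc : ((((a :: b :: t).length : Int) + 1) / 2).toNat
        = (((t.length : Int) + 1) / 2).toNat + 1 := by
      simp only [List.length_cons]; push_cast; omega
    rw [hc, List.range_succ_eq_map, List.filterMap_cons, List.filterMap_map]
    simp only [Function.comp_def, Nat.succ_eq_add_one]
    have h3 : List.filterMap (fun k : Nat => (a :: b :: t)[(2 * ((k + 1 : Nat) : Int)).toNat]?)
        (List.range (((t.length : Int) + 1) / 2).toNat)
        = List.filterMap (fun k : Nat => t[(2 * (k : Int)).toNat]?)
        (List.range (((t.length : Int) + 1) / 2).toNat) := by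
      apply List.filterMap_congr
      intro k _
      have hidx : (2 * ((k : Int) + 1)).toNat = (2 * (k : Int)).toNat + 2 := by omega
      push_cast
      rw [hidx]
      simp
    push_cast at h3 ⊢
    rw [h3, pv_filterMap_evens t]
    simp [pvEvens, pvOdds]

theorem pv_slice_evens (xs : List Int) :
    (PySem.List.slice? xs none none 2).getD [] = pvEvens xs := by
  have h := pv_filterMap_evens xs
  simp only [PySem.List.slice?, PySem.List.sliceIndices] at *
  norm_num at *
  have hcnt : (if 0 < xs.length then (((xs.length : Int) + 2 - 1) / 2).toNat else 0)
      = (((xs.length : Int) + 1) / 2).toNat := by split <;> omega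
  rw [hcnt]
  exact h

theorem pv_slice_odds (xs : List Int) :
    (PySem.List.slice? xs (some 1) none 2).getD [] = pvOdds xs := by
  cases xs with
  | nil => simp [PySem.List.slice?, PySem.List.sliceIndices, pvOdds]
  | cons a t =>
    simp only [PySem.List.slice?, PySem.List.sliceIndices]
    norm_num
    have hcnt : (if 0 < t.length then (((t.length : Int) + 2 - 1) / 2).toNat else 0)
        = (((t.length : Int) + 1) / 2).toNat := by split <;> omega
    rw [hcnt, show pvOdds (a :: t) = pvEvens t from rfl, ← pv_filterMap_evens t]
    apply List.filterMap_congr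
    intro k _
    have hidx : (1 + 2 * (k : Int)).toNat = (2 * (k : Int)).toNat + 1 := by omega
    rw [hidx]
    simp

theorem pv_fold_parity : ∀ (xs : List Int) (n acc : Int),
    (PySem.List.enumerate xs n).foldl
      (fun s p => if PySem.Int.mod p.1 2 == 0 then s + p.2 else s + p.2 * 3) acc
    = if n % 2 = 0 then acc + (pvEvens xs).sum + 3 * (pvOdds xs).sum
      else acc + 3 * (pvEvens xs).sum + (pvOdds xs).sum
  | [], n, acc => by simp [PySem.List.enumerate_nil, pvEvens, pvOdds]
  | a :: t, n, acc => by
    rw [PySem.List.enumerate_cons, List.foldl_cons]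
    simp only [PySem.Int.mod, pv_fmod_two]
    have IH := pv_fold_parity t (n + 1)
    simp only [PySem.Int.mod, pv_fmod_two] at IH
    rcases Int.emod_two_eq n with h | h
    · simp only [h, show ((0 : Int) == 0) = true from rfl, if_true]
      rw [IH (acc + a), if_neg (by omega)]
      simp [pvEvens, pvOdds]; ring
    · have hb : ((n % 2 : Int) == 0) = false := by simp [h]
      rw [hb]
      simp only [Bool.false_eq_true, if_false]
      rw [IH (acc + a * 3), if_pos (by omega), if_neg (by omega)]
      simp [pvEvens, pvOdds]; ring

-- ===== VERDICT (by name: the statement is the Claim_ definition above) =====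
theorem calculate_check_digit_13_spec : Claim_equal_calculate_check_digit_13 := by
  intro xs _
  unfold Spec_calculate_check_digit_13 calculate_check_digit_13 calculate_check_digit_13_alt
  rw [pv_slice_evens, pv_slice_odds]
  have h := pv_fold_parity xs 0 0
  rw [if_pos (by norm_num : (0 : Int) % 2 = 0)] at h
  rw [h]
  norm_num
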